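-- pv_equiv track=rewrite | github.com/EvanSun96/codesignal | robinhoodprep.py | isZigZag
-- ===== SOURCE A (Python) =====
-- def isZigZag(numbers):
--     if not numbers or len(numbers) < 3:
--         return []
--     res = []
--     for i in range(1, len(numbers)-1):
--         if numbers[i-1]<numbers[i]>numbers[i+1] or numbers[i-1]>numbers[i]<numbers[i+1]:
--             res.append(1)
--         else:
--             res.append(0)
--     return res
-- ===== SOURCE B (Python) =====
-- def isZigZag(numbers):
--     # Stage 1: run-length encode the directions of the consecutive steps.
--     runs = []  # list of (direction, run_length), direction in {-1, 0, 1}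
--     for i in range(len(numbers) - 1):
--         d = (numbers[i + 1] > numbers[i]) - (numbers[i + 1] < numbers[i])
--         if runs and runs[-1][0] == d:
--             runs[-1] = (d, runs[-1][1] + 1)
--         else:
--             runs.append((d, 1))
--     # Stage 2: inside a run every interior point is 0; a run boundary is 1
--     # exactly when a strictly rising run meets a strictly falling one.
--     res = []
--     for k in range(len(runs)):
--         d, l = runs[k]
--         res.extend([0] * (l - 1))
--         if k + 1 < len(runs):
--             res.append(1 if d * runs[k + 1][0] < 0 else 0)
--     return res
-- ===== Notes on version B (the rewrite author's own statement) =====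
-- stated objective: alternative
-- what changed: B is a two-stage algorithm: it first run-length encodes the directions (-1/0/1) of the consecutive steps into maximal monotone runs, then emits zeros for the interior of each run and a 1 exactly at each boundary where a strictly rising run meets a strictly falling one (opposite-sign directions), whereas A tests each window of three elements directly.
import Mathlib
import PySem

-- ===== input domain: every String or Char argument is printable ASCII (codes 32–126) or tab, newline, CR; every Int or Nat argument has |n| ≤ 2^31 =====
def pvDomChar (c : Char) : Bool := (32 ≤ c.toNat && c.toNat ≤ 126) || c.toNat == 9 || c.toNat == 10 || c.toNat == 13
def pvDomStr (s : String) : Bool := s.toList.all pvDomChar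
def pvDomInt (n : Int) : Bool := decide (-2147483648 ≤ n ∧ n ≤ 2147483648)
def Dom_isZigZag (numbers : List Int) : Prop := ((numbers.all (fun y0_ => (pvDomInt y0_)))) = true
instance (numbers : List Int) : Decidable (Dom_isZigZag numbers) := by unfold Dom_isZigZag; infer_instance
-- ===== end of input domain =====

-- B uses a different two-stage algorithm: run-length encode the step directions, then emit
-- zeros inside each run and a flag at each boundary of opposite-direction runs; objective: alternative.


-- ===== PORT A =====
def isZigZag (numbers : List Int) : List Int :=
  if numbers = [] ∨ numbers.length < 3 then []
  else
    (PySem.List.pyRange 1 ((numbers.length : Int) - 1) 1).foldl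
      (fun res i =>
        let x := PySem.List.pyGetD numbers (i - 1) 0
        let y := PySem.List.pyGetD numbers i 0
        let z := PySem.List.pyGetD numbers (i + 1) 0
        if (x < y ∧ y > z) ∨ (x > y ∧ y < z) then res ++ [1] else res ++ [0]) []

-- ===== PORT B =====
-- Stage-1 loop body: Python's `runs[-1]` on a possibly-empty list is ported via getLast?
-- (none = empty list, matching the `runs and …` guard); `runs[-1] = (d, l+1)` is dropLast ++ [(d, l+1)].
def pvRleStep (runs : List (Int × Int)) (d : Int) : List (Int × Int) :=
  match runs.getLast? with
  | some (d', l) => if d' = d then runs.dropLast ++ [(d', l + 1)] else runs ++ [(d, 1)]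
  | none => runs ++ [(d, 1)]

def isZigZag_alt (numbers : List Int) : List Int :=
  let runs := (PySem.List.pyRange 0 ((numbers.length : Int) - 1) 1).foldl
    (fun runs i =>
      let d : Int := (if PySem.List.pyGetD numbers (i + 1) 0 > PySem.List.pyGetD numbers i 0 then 1 else 0)
                   - (if PySem.List.pyGetD numbers (i + 1) 0 < PySem.List.pyGetD numbers i 0 then 1 else 0)
      pvRleStep runs d) []
  (PySem.List.pyRange 0 ((runs.length : Int)) 1).foldl
    (fun res k =>
      let p := PySem.List.pyGetD runs k (0, 0)
      let res := res ++ List.replicate (p.2 - 1).toNat (0 : Int)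
      if k + 1 < (runs.length : Int) then
        res ++ [if p.1 * (PySem.List.pyGetD runs (k + 1) (0, 0)).1 < 0 then (1 : Int) else 0]
      else res) []

-- ===== PRECONDITION & SPEC =====
def Spec_isZigZag (numbers : List Int) (out : List Int) : Prop := out = isZigZag_alt numbers
instance (numbers : List Int) (out : List Int) : Decidable (Spec_isZigZag numbers out) := by unfold Spec_isZigZag; infer_instance

-- ===== CLAIM (what is proved, stated in full; the proofs are below) =====
def Claim_equal_isZigZag : Prop := ∀ (numbers : List Int), Dom_isZigZag numbers → Spec_isZigZag numbers (isZigZag numbers)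

-- ===== LEMMAS AND PROOFS =====

-- Reference recursion both ports are reduced to (A's three-way condition).
def pvZZ : List Int → List Int
  | a :: b :: c :: t => (if (a < b ∧ b > c) ∨ (a > b ∧ b < c) then (1 : Int) else 0) :: pvZZ (b :: c :: t)
  | _ => []

-- Direction of one step, and the list of step directions.
def pvSgn (a b : Int) : Int := (if b > a then 1 else 0) - (if b < a then 1 else 0)

def pvDirs : List Int → List Int
  | a :: b :: t => pvSgn a b :: pvDirs (b :: t)
  | _ => []

-- Recursive run-length encoder (current run: direction d, length l ≥ 1).
def pvRle (d l : Int) : List Int → List (Int × Int)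
  | [] => [(d, l)]
  | x :: t => if d = x then pvRle d (l + 1) t else (d, l) :: pvRle x 1 t

-- Recursive form of B's stage 2.
def pvEmit : List (Int × Int) → List Int
  | [] => []
  | [(_, l)] => List.replicate (l - 1).toNat 0
  | (d, l) :: (d', l') :: t =>
      List.replicate (l - 1).toNat 0 ++ [if d * d' < 0 then (1 : Int) else 0] ++ pvEmit ((d', l') :: t)

-- Boundary flags read directly off the direction list.
def pvG : Int → List Int → List Int
  | _, [] => []
  | d, x :: t => (if d * x < 0 then (1 : Int) else 0) :: pvG x t

theorem pvFoldl_rle (ds : List Int) : ∀ (pre : List (Int × Int)) (d l : Int),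
    List.foldl pvRleStep (pre ++ [(d, l)]) ds = pre ++ pvRle d l ds := by
  induction ds with
  | nil => intro pre d l; simp [pvRle]
  | cons x t ih =>
    intro pre d l
    rw [List.foldl_cons]
    show List.foldl pvRleStep (pvRleStep (pre ++ [(d, l)]) x) t = _
    rw [pvRleStep, List.getLast?_concat]
    by_cases h : d = x
    · simp only [List.dropLast_concat, ih pre d (l + 1), pvRle, if_pos h]
    · simp only [pvRle, if_neg h]
      rw [show (pre ++ [(d, l)]) ++ [(x, 1)] = (pre ++ [(d, l)]) ++ [(x, 1)] from rfl,
          ih (pre ++ [(d, l)]) x 1]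
      simp

theorem pvRle_head (ds : List Int) : ∀ (d l : Int), ∃ m r, pvRle d l ds = (d, m) :: r := by
  induction ds with
  | nil => intro d l; exact ⟨l, [], rfl⟩
  | cons x t ih =>
    intro d l
    by_cases h : d = x
    · obtain ⟨m, r, hm⟩ := ih d (l + 1)
      exact ⟨m, r, by rw [pvRle, if_pos h, hm]⟩
    · obtain ⟨m, r, hm⟩ := ih x 1
      exact ⟨l, pvRle x 1 t, by rw [pvRle, if_neg h]⟩

theorem pvEmit_rle (ds : List Int) : ∀ (d l : Int), 1 ≤ l →
    pvEmit (pvRle d l ds) = List.replicate (l - 1).toNat 0 ++ pvG d ds := by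
  induction ds with
  | nil => intro d l _; simp [pvRle, pvEmit, pvG]
  | cons x t ih =>
    intro d l hl
    by_cases h : d = x
    · rw [pvRle, if_pos h, ih d (l + 1) (by omega), pvG]
      have h0 : ¬ d * x < 0 := by rw [← h]; exact not_lt.mpr (mul_self_nonneg d)
      rw [if_neg h0]
      have : (l + 1 - 1).toNat = (l - 1).toNat + 1 := by omega
      rw [this, List.replicate_succ', List.append_assoc]
      subst h
      simp
    · rw [pvRle, if_neg h]
      obtain ⟨m, r, hm⟩ := pvRle_head t x 1
      rw [hm]
      show List.replicate (l - 1).toNat 0 ++ [if d * x < 0 then (1 : Int) else 0] ++ pvEmit ((x, m) :: r) = _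
      rw [← hm, ih x 1 (by omega), pvG]
      simp

theorem pvG_dirs (t : List Int) : ∀ (a b : Int),
    pvG (pvSgn a b) (pvDirs (b :: t)) = pvZZ (a :: b :: t) := by
  induction t with
  | nil => intro a b; rfl
  | cons c t' ih =>
    intro a b
    show (if pvSgn a b * pvSgn b c < 0 then (1 : Int) else 0) :: pvG (pvSgn b c) (pvDirs (c :: t')) = _
    rw [ih b c]
    show _ = (if (a < b ∧ b > c) ∨ (a > b ∧ b < c) then (1 : Int) else 0) :: pvZZ (b :: c :: t')
    congr 1
    have hiff : (pvSgn a b * pvSgn b c < 0) ↔ ((a < b ∧ b > c) ∨ (a > b ∧ b < c)) := by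
      unfold pvSgn
      split_ifs <;> norm_num <;> omega
    exact if_congr hiff rfl rfl

theorem pvDirs_map (xs : List Int) :
    (List.range (xs.length - 1)).map (fun k => pvSgn (xs.getD k 0) (xs.getD (k + 1) 0)) = pvDirs xs := by
  match xs with
  | [] => rfl
  | [a] => rfl
  | a :: b :: t =>
    have ih := pvDirs_map (b :: t)
    have hlen : (a :: b :: t).length - 1 = ((b :: t).length - 1) + 1 := by simp
    rw [hlen, List.range_succ_eq_map, List.map_cons, List.map_map]
    have hshift : ((fun k => pvSgn ((a :: b :: t).getD k 0) ((a :: b :: t).getD (k + 1) 0)) ∘ Nat.succ)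
        = fun k => pvSgn ((b :: t).getD k 0) ((b :: t).getD (k + 1) 0) := by
      funext k; simp [Nat.succ_eq_add_one]
    rw [hshift, ih]
    rfl

-- B's stage 1 computes the recursive RLE of the direction list.
theorem pvStage1 (xs : List Int) :
    (PySem.List.pyRange 0 ((xs.length : Int) - 1) 1).foldl
      (fun runs i =>
        let d : Int := (if PySem.List.pyGetD xs (i + 1) 0 > PySem.List.pyGetD xs i 0 then 1 else 0)
                     - (if PySem.List.pyGetD xs (i + 1) 0 < PySem.List.pyGetD xs i 0 then 1 else 0)
        pvRleStep runs d) []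
    = List.foldl pvRleStep [] (pvDirs xs) := by
  rw [PySem.List.pyRange_one, List.foldl_map]
  have hcast : ((xs.length : Int) - 1 - 0).toNat = xs.length - 1 := by omega
  rw [hcast, ← pvDirs_map xs, List.foldl_map]
  apply PySem.List.foldl_congr_mem
  intro runs k _
  have h0 : (0 : Int) + (k : Nat) = ((k : Nat) : Int) := by omega
  have h1 : ((k : Nat) : Int) + 1 = (((k + 1 : Nat)) : Int) := by omega
  simp only [h0, h1, PySem.List.pyGetD_natCast]
  rfl

-- The Nat-indexed block of B's stage-2 loop body.
def pvBlock (runs : List (Int × Int)) (k : Nat) : List Int :=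
  List.replicate ((runs.getD k (0, 0)).2 - 1).toNat 0 ++
    (if k + 1 < runs.length then [if (runs.getD k (0, 0)).1 * (runs.getD (k + 1) (0, 0)).1 < 0 then (1 : Int) else 0] else [])

theorem pvFlatMap_block (runs : List (Int × Int)) :
    (List.range runs.length).flatMap (pvBlock runs) = pvEmit runs := by
  match runs with
  | [] => rfl
  | (d, l) :: rs =>
    have ih := pvFlatMap_block rs
    rw [show ((d, l) :: rs).length = rs.length + 1 from rfl, List.range_succ_eq_map,
        List.flatMap_cons, List.flatMap_map]
    have hshift : (fun k => pvBlock ((d, l) :: rs) (Nat.succ k)) = pvBlock rs := by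
      funext k
      simp [pvBlock, Nat.succ_eq_add_one]
    rw [hshift, ih]
    match rs with
    | [] => simp [pvBlock, pvEmit]
    | (d', l') :: t =>
      show pvBlock ((d, l) :: (d', l') :: t) 0 ++ pvEmit ((d', l') :: t) = _
      simp [pvBlock, pvEmit, List.append_assoc]

theorem pvStage2 (runs : List (Int × Int)) :
    (PySem.List.pyRange 0 ((runs.length : Int)) 1).foldl
      (fun res k =>
        let p := PySem.List.pyGetD runs k (0, 0)
        let res := res ++ List.replicate (p.2 - 1).toNat (0 : Int)
        if k + 1 < (runs.length : Int) then
          res ++ [if p.1 * (PySem.List.pyGetD runs (k + 1) (0, 0)).1 < 0 then (1 : Int) else 0]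
        else res) []
    = pvEmit runs := by
  rw [PySem.List.pyRange_zero_natCast, List.foldl_map]
  have hbody : (fun (res : List Int) (k : Nat) =>
      (fun res k =>
        let p := PySem.List.pyGetD runs k (0, 0)
        let res := res ++ List.replicate (p.2 - 1).toNat (0 : Int)
        if k + 1 < (runs.length : Int) then
          res ++ [if p.1 * (PySem.List.pyGetD runs (k + 1) (0, 0)).1 < 0 then (1 : Int) else 0]
        else res) res ((k : Nat) : Int))
      = fun res k => res ++ pvBlock runs k := by
    funext res k
    have h1 : ((k : Nat) : Int) + 1 = (((k + 1 : Nat)) : Int) := by omega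
    dsimp only
    rw [h1, PySem.List.pyGetD_natCast, PySem.List.pyGetD_natCast]
    dsimp only [pvBlock]
    by_cases hc : k + 1 < runs.length
    · rw [if_pos (show (((k + 1 : Nat)) : Int) < (runs.length : Int) by exact_mod_cast hc),
          if_pos hc, List.append_assoc]
    · rw [if_neg (show ¬ (((k + 1 : Nat)) : Int) < (runs.length : Int) by exact_mod_cast hc),
          if_neg hc, List.append_nil]
  rw [hbody, PySem.List.foldl_append_eq_flatMap, List.nil_append, pvFlatMap_block]

theorem pvAlt_eq_zz (xs : List Int) : isZigZag_alt xs = pvZZ xs := by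
  simp only [isZigZag_alt]
  rw [pvStage1, pvStage2]
  match xs with
  | [] => rfl
  | [a] => rfl
  | a :: b :: t =>
    show pvEmit (List.foldl pvRleStep [] (pvSgn a b :: pvDirs (b :: t))) = _
    rw [List.foldl_cons]
    have hstep : pvRleStep [] (pvSgn a b) = [] ++ [(pvSgn a b, 1)] := rfl
    rw [hstep, pvFoldl_rle, List.nil_append, pvEmit_rle _ _ _ (by norm_num), pvG_dirs]
    rfl

-- ===== PROOF FOR PORT A (as before: reduce A's loop to pvZZ) =====
def pvF (xs : List Int) (k : Nat) : Int :=
  if (xs.getD k 0 < xs.getD (k+1) 0 ∧ xs.getD (k+1) 0 > xs.getD (k+2) 0) ∨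
     (xs.getD k 0 > xs.getD (k+1) 0 ∧ xs.getD (k+1) 0 < xs.getD (k+2) 0) then 1 else 0

theorem pvMap_range_eq_zz (xs : List Int) :
    (List.range (xs.length - 2)).map (pvF xs) = pvZZ xs := by
  match xs with
  | [] => rfl
  | [a] => rfl
  | [a, b] => rfl
  | a :: b :: c :: t =>
    have ih := pvMap_range_eq_zz (b :: c :: t)
    have hlen : (a :: b :: c :: t).length - 2 = ((b :: c :: t).length - 2) + 1 := by
      simp
    rw [hlen, List.range_succ_eq_map, List.map_cons, List.map_map]
    have hshift : (pvF (a :: b :: c :: t)) ∘ Nat.succ = pvF (b :: c :: t) := by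
      funext k; simp [pvF, Nat.succ_eq_add_one]
    rw [hshift, ih]
    rfl

theorem pvA_eq_zz (xs : List Int) : isZigZag xs = pvZZ xs := by
  by_cases h : xs = [] ∨ xs.length < 3
  · rw [isZigZag, if_pos h]
    rcases h with h | h
    · subst h; rfl
    · match xs, h with
      | [], _ => rfl
      | [a], _ => rfl
      | [a, b], _ => rfl
  · rw [isZigZag, if_neg h]
    have hbody : (fun (res : List Int) (i : Int) =>
        let x := PySem.List.pyGetD xs (i - 1) 0
        let y := PySem.List.pyGetD xs i 0
        let z := PySem.List.pyGetD xs (i + 1) 0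
        if (x < y ∧ y > z) ∨ (x > y ∧ y < z) then res ++ [1] else res ++ [0])
      = (fun (res : List Int) (i : Int) => res ++
          [if (PySem.List.pyGetD xs (i - 1) 0 < PySem.List.pyGetD xs i 0 ∧
               PySem.List.pyGetD xs i 0 > PySem.List.pyGetD xs (i + 1) 0) ∨
              (PySem.List.pyGetD xs (i - 1) 0 > PySem.List.pyGetD xs i 0 ∧
               PySem.List.pyGetD xs i 0 < PySem.List.pyGetD xs (i + 1) 0)
           then (1 : Int) else 0]) := by
      funext res i; dsimp only; split_ifs <;> rfl
    rw [hbody, PySem.List.foldl_append_singleton_eq_map, List.nil_append,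
        PySem.List.pyRange_one, List.map_map, ← pvMap_range_eq_zz]
    have hcast : ((xs.length : Int) - 1 - 1).toNat = xs.length - 2 := by omega
    rw [hcast]
    apply List.map_congr_left
    intro k hk
    simp only [Function.comp]
    have h2 : (1 : Int) + (k : Nat) = (((k + 1 : Nat)) : Int) := by omega
    have h1 : (((k + 1 : Nat)) : Int) - 1 = ((k : Nat) : Int) := by omega
    have h3 : (((k + 1 : Nat)) : Int) + 1 = (((k + 2 : Nat)) : Int) := by omega
    simp only [h2, h1, h3, PySem.List.pyGetD_natCast, pvF]

-- ===== VERDICT (by name: the statement is the Claim_ definition above) =====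
theorem isZigZag_spec : Claim_equal_isZigZag := by
  intro xs _
  unfold Spec_isZigZag
  rw [pvA_eq_zz, pvAlt_eq_zz]
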